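-- pv_equiv track=rewrite | github.com/naina010/DSA | String/Group identical strings.py | group_identical_strings
-- ===== SOURCE A (Python) =====
-- def compute_hash(s):
--     p = 31
--     hash = 0
--     mod = 10**9+7
--     p_pow = 1
--     for c in s:
--         hash = (hash + (ord(c)-96)*p_pow)%mod
--         p_pow = (p_pow*p)%mod
--     return hash
--
-- def group_identical_strings(arr, n):
--     string_hash = []
--     for i in range(n):
--         string_hash.append((compute_hash(arr[i]), i))   # O(N.M)
--     string_hash.sort()                                  # O(NlogN)
--     groups = [[string_hash[0][1]]]
--     for i in range(1, n):
--         if string_hash[i][0] == string_hash[i-1][0]: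
--             groups[-1].append(string_hash[i][1])
--         else:
--             groups.append([string_hash[i][1]])
--     return groups
-- ===== SOURCE B (Python) =====
-- def compute_hash(s):
--     p = 31
--     hash = 0
--     mod = 10**9+7
--     p_pow = 1
--     for c in s:
--         hash = (hash + (ord(c)-96)*p_pow)%mod
--         p_pow = (p_pow*p)%mod
--     return hash
--
-- def group_identical_strings(arr, n):
--     table = {}
--     for i in range(n):
--         table.setdefault(compute_hash(arr[i]), []).append(i)
--     return [table[h] for h in sorted(table)]
-- ===== Notes on version B (the rewrite author's own statement) =====
-- stated objective: alternative
-- what changed: A hashes all strings, sorts the (hash, index) pairs lexicographically and scans consecutive pairs to cut groups; B never sorts the pairs: it buckets the indices in a dict keyed by hash in one pass and emits the buckets ordered by sorting only the distinct hash keys, so the pair sort and the consecutive-equality scan disappear.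
-- crash fix: On n <= 0 A raises IndexError (it indexes string_hash[0] of an empty list) while B returns []. — e.g. on group_identical_strings([], 0): A raises IndexError, B returns []
import Mathlib
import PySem

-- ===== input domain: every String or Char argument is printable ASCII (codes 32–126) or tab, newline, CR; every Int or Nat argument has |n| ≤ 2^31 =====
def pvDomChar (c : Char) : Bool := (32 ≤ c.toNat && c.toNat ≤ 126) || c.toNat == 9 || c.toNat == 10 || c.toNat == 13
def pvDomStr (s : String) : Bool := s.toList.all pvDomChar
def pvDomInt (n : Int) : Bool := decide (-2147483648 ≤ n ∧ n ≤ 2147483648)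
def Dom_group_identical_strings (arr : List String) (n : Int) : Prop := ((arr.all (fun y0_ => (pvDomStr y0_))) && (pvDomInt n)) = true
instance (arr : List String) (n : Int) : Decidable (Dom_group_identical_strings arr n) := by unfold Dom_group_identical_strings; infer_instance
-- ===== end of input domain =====

-- B buckets the indices in a dict keyed by hash and emits the buckets along the sorted
-- distinct keys, instead of A's sort of all (hash, index) pairs + consecutive-pair scan.

-- ===== PORT A =====
def compute_hash (s : String) : Int :=
  let p : Int := 31
  let m : Int := 10 ^ 9 + 7
  let st := s.toList.foldl
    (fun (hp : Int × Int) c =>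
      (PySem.Int.mod (hp.1 + ((c.toNat : Int) - 96) * hp.2) m,
       PySem.Int.mod (hp.2 * p) m)) (0, 1)
  st.1

def group_identical_strings (arr : List String) (n : Int) : List (List Int) :=
  let string_hash : List (Int × Int) :=
    (PySem.List.pyRange 0 n 1).foldl
      (fun acc i => acc ++ [(compute_hash (PySem.List.pyGetD arr i ""), i)]) []
  let sh := PySem.List.sorted2 string_hash Prod.fst Prod.snd
  let groups : List (List Int) := [[(PySem.List.pyGetD sh 0 (0, 0)).2]]
  (PySem.List.pyRange 1 n 1).foldl
    (fun gs i =>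
      let cur := PySem.List.pyGetD sh i (0, 0)
      let prev := PySem.List.pyGetD sh (i - 1) (0, 0)
      if cur.1 = prev.1 then gs.dropLast ++ [gs.getLastD [] ++ [cur.2]]
      else gs ++ [[cur.2]]) groups

-- ===== PORT B =====
def group_identical_strings_alt (arr : List String) (n : Int) : List (List Int) :=
  let table : PySem.Dict Int (List Int) :=
    (PySem.List.pyRange 0 n 1).foldl
      (fun d i => d.modify (compute_hash (PySem.List.pyGetD arr i "")) [] (· ++ [i]))
      PySem.Dict.empty
  (PySem.List.sorted table.keys (fun x => x) false).map (fun h => table.getD h [])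

-- ===== PRECONDITION & SPEC =====
-- Pre_ excludes exactly the inputs where Python A raises IndexError: n ≤ 0 (string_hash[0]
-- of an empty list) and n > len(arr) (arr[i] out of range).
def Pre_group_identical_strings (arr : List String) (n : Int) : Prop :=
  1 ≤ n ∧ n ≤ arr.length
instance (arr : List String) (n : Int) : Decidable (Pre_group_identical_strings arr n) := by
  unfold Pre_group_identical_strings; infer_instance
def pvWitness_group_identical_strings : List String × Int := (["ab", "c", "ab"], 3)

-- On n ≤ 0 A raises IndexError (string_hash[0] of an empty list) while B returns [].
def Raises_group_identical_strings (arr : List String) (n : Int) : Prop := n ≤ 0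
instance (arr : List String) (n : Int) : Decidable (Raises_group_identical_strings arr n) := by
  unfold Raises_group_identical_strings; infer_instance
def pvRaiseWitness_group_identical_strings : List String × Int := ([], 0)
def pvRaiseWitnessOut_group_identical_strings : List (List Int) := []

def Spec_group_identical_strings (arr : List String) (n : Int) (out : List (List Int)) : Prop := out = group_identical_strings_alt arr n
instance (arr : List String) (n : Int) (out : List (List Int)) : Decidable (Spec_group_identical_strings arr n out) := by unfold Spec_group_identical_strings; infer_instance

-- ===== CLAIM (what is proved, stated in full; the proofs are below) =====
def Claim_equal_group_identical_strings : Prop := ∀ (arr : List String) (n : Int), Dom_group_identical_strings arr n → Pre_group_identical_strings arr n → Spec_group_identical_strings arr n (group_identical_strings arr n)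
def Claim_raises_group_identical_strings : Prop := (∀ (arr : List String) (n : Int), Dom_group_identical_strings arr n → Raises_group_identical_strings arr n → ¬ Pre_group_identical_strings arr n) ∧ (Dom_group_identical_strings (pvRaiseWitness_group_identical_strings.1) (pvRaiseWitness_group_identical_strings.2) ∧ Raises_group_identical_strings (pvRaiseWitness_group_identical_strings.1) (pvRaiseWitness_group_identical_strings.2) ∧ group_identical_strings_alt (pvRaiseWitness_group_identical_strings.1) (pvRaiseWitness_group_identical_strings.2) = pvRaiseWitnessOut_group_identical_strings)


-- ===== LEMMAS AND PROOFS =====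

-- lexicographic order on Int × Int, as Python compares the tuples in A's sort
def lexlt (a b : Int × Int) : Prop := a.1 < b.1 ∨ (a.1 = b.1 ∧ a.2 < b.2)

lemma before_eq : (fun (a b : Int × Int) => decide (a.1 < b.1) || (!decide (b.1 < a.1) && decide (a.2 < b.2)))
    = (fun (a b : Int × Int) => decide (toLex a < toLex b)) := by
  funext a b
  rcases lt_trichotomy a.1 b.1 with h|h|h
  · simp [Prod.Lex.toLex_lt_toLex, h, lt_asymm h]
  · simp [Prod.Lex.toLex_lt_toLex, h]
  · simp [Prod.Lex.toLex_lt_toLex, h, h.ne', lt_asymm h]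

-- the tuple sort sorted2 is sorted with the toLex key
lemma sorted2_eq_sorted_toLex (xs : List (Int × Int)) :
    PySem.List.sorted2 xs Prod.fst Prod.snd = PySem.List.sorted xs (fun p => toLex p) := by
  show List.foldl (fun acc x => PySem.List.insertBy (fun a b => decide (a.1 < b.1) || (!decide (b.1 < a.1) && decide (a.2 < b.2))) x acc) [] xs
     = List.foldl (fun acc x => PySem.List.insertBy (fun a b => decide (toLex a < toLex b)) x acc) [] xs
  rw [before_eq]

lemma sorted2_eq_of_perm_of_pairwise_lexlt (xs ys : List (Int × Int))
    (hp : ys.Perm xs) (hpw : ys.Pairwise lexlt) :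
    PySem.List.sorted2 xs Prod.fst Prod.snd = ys := by
  rw [sorted2_eq_sorted_toLex]
  exact PySem.List.sorted_eq_of_perm_of_pairwise_lt xs ys _ hp
    (hpw.imp (fun h => Prod.Lex.toLex_lt_toLex.mpr (by exact h)))

-- flatMap of the per-key filters over a nodup cover is a permutation of the list
lemma perm_flatMap_filter (ks : List Int) :
    ∀ (ps : List (Int × Int)), ks.Nodup → (∀ p ∈ ps, p.1 ∈ ks) →
    (ks.flatMap (fun h => ps.filter (fun p => p.1 == h))).Perm ps := by
  induction ks with
  | nil =>
    intro ps _ hcov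
    have : ps = [] := List.eq_nil_iff_forall_not_mem.mpr (fun p hp => by simpa using hcov p hp)
    simp [this]
  | cons k kt ih =>
    intro ps hnd hcov
    rw [List.flatMap_cons]
    have hstep : ∀ h ∈ kt, ps.filter (fun p => p.1 == h)
        = (ps.filter (fun p => !(p.1 == k))).filter (fun p => p.1 == h) := by
      intro h hh
      rw [List.filter_filter]
      apply List.filter_congr
      intro p _
      by_cases he : p.1 = h
      · have : h ≠ k := by rintro rfl; exact (List.nodup_cons.mp hnd).1 hh
        simp [he, this]
      · simp [he]
    have hflat : kt.flatMap (fun h => ps.filter (fun p => p.1 == h))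
        = kt.flatMap (fun h => (ps.filter (fun p => !(p.1 == k))).filter (fun p => p.1 == h)) := by
      exact List.flatMap_congr hstep
    rw [hflat]
    refine List.Perm.trans (List.Perm.append_left _ ?_) (List.filter_append_perm _ ps)
    apply ih
    · exact (List.nodup_cons.mp hnd).2
    · intro p hp
      have hm := List.mem_of_mem_filter hp
      have hne := List.of_mem_filter hp
      have := hcov p hm
      simp at hne this
      tauto

-- blocks with equal first components, listed along strictly increasing keys, are lex-sorted
lemma pairwise_flatMap_lexlt (blk : Int → List (Int × Int)) (ks : List Int)
    (hks : ks.Pairwise (· < ·))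
    (hall : ∀ h ∈ ks, ∀ p ∈ blk h, p.1 = h)
    (hin : ∀ h ∈ ks, (blk h).Pairwise lexlt) :
    (ks.flatMap blk).Pairwise lexlt := by
  induction ks with
  | nil => simp
  | cons k kt ih =>
    rw [List.flatMap_cons, List.pairwise_append]
    refine ⟨hin k (by simp), ih hks.tail (fun h hh => hall h (by simp [hh])) (fun h hh => hin h (by simp [hh])), ?_⟩
    intro a ha b hb
    obtain ⟨h, hh, hbh⟩ := List.mem_flatMap.mp hb
    have h1 : a.1 = k := hall k (by simp) a ha
    have h2 : b.1 = h := hall h (by simp [hh]) b hbh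
    have : k < h := (List.pairwise_cons.mp hks).1 h hh
    exact Or.inl (by omega)

-- A's grouping loop, written structurally over the sorted pair list
def grp (gs : List (List Int)) (ph : Int) : List (Int × Int) → List (List Int)
  | [] => gs
  | q :: t =>
      if q.1 = ph then grp (gs.dropLast ++ [gs.getLastD [] ++ [q.2]]) q.1 t
      else grp (gs ++ [[q.2]]) q.1 t

lemma grp_block (b : List (Int × Int)) :
    ∀ (done : List (List Int)) (cur : List Int) (ph : Int) (t : List (Int × Int)),
    (∀ p ∈ b, p.1 = ph) →
    grp (done ++ [cur]) ph (b ++ t) = grp (done ++ [cur ++ b.map (·.2)]) ph t := by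
  induction b with
  | nil => intro done cur ph t _; simp
  | cons q b ih =>
    intro done cur ph t hb
    have hq : q.1 = ph := hb q (by simp)
    simp only [List.cons_append, grp, hq]
    rw [List.dropLast_concat, List.getLastD_concat]
    have := ih done (cur ++ [q.2]) ph t (fun p hp => hb p (by simp [hp]))
    simpa [List.append_assoc] using this

lemma grp_flat (blk : Int → List (Int × Int)) (ks : List Int) :
    ∀ (done : List (List Int)) (cur : List Int) (ph : Int),
    (ph :: ks).Pairwise (· < ·) →
    (∀ h ∈ ks, blk h ≠ [] ∧ ∀ p ∈ blk h, p.1 = h) →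
    grp (done ++ [cur]) ph (ks.flatMap blk) =
      (done ++ [cur]) ++ ks.map (fun h => (blk h).map (·.2)) := by
  induction ks with
  | nil => intro done cur ph _ _; simp [grp]
  | cons k kt ih =>
    intro done cur ph hpw hblk
    obtain ⟨hne, hall⟩ := hblk k (by simp)
    obtain ⟨q, b, hqb⟩ : ∃ q b, blk k = q :: b := by
      cases h : blk k with
      | nil => exact absurd h hne
      | cons q b => exact ⟨q, b, rfl⟩
    have hq : q.1 = k := hall q (by simp [hqb])
    have hne' : q.1 ≠ ph := by
      have : ph < k := (List.pairwise_cons.mp hpw).1 k (by simp)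
      omega
    rw [List.flatMap_cons, hqb]
    simp only [List.cons_append, grp, if_neg hne']
    rw [show done ++ [cur] ++ [[q.2]] = (done ++ [cur]) ++ [[q.2]] from rfl]
    rw [hq]
    rw [grp_block b (done ++ [cur]) [q.2] k (kt.flatMap blk) (fun p hp => hall p (by simp [hqb, hp]))]
    have hpw' : (k :: kt).Pairwise (· < ·) := (List.pairwise_cons.mp hpw).2
    rw [ih (done ++ [cur]) ([q.2] ++ b.map (·.2)) k hpw' (fun h hh => hblk h (by simp [hh]))]
    simp [hqb, List.append_assoc]

-- A's index-based fold over range(1, n) equals the structural grouping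
lemma fold_idx (sh : List (Int × Int)) :
    ∀ (j : Nat) (gs : List (List Int)), (h0 : 0 < j) → (hj : j ≤ sh.length) →
    (PySem.List.pyRange (j : Int) (sh.length : Int) 1).foldl
      (fun gs i =>
        if (PySem.List.pyGetD sh i (0, 0)).1 = (PySem.List.pyGetD sh (i - 1) (0, 0)).1
        then gs.dropLast ++ [gs.getLastD [] ++ [(PySem.List.pyGetD sh i (0, 0)).2]]
        else gs ++ [[(PySem.List.pyGetD sh i (0, 0)).2]]) gs
    = grp gs (sh[j - 1]'(by omega)).1 (sh.drop j) := by
  intro j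
  induction hfuel : sh.length - j generalizing j with
  | zero =>
    intro gs h0 hj
    rw [PySem.List.pyRange_one_eq_nil (by omega)]
    rw [List.drop_of_length_le (by omega)]
    simp [grp]
  | succ m ih =>
    intro gs h0 hj
    have hlt : j < sh.length := by omega
    rw [PySem.List.pyRange_one_cons (by exact_mod_cast hlt)]
    rw [List.foldl_cons]
    have hcur : PySem.List.pyGetD sh (j : Int) (0, 0) = sh[j]'hlt := by
      rw [PySem.List.pyGetD_eq_getElem sh (0, 0) (by omega) (by exact_mod_cast hlt)]
      simp
    have hprev : PySem.List.pyGetD sh ((j : Int) - 1) (0, 0) = sh[j-1]'(by omega) := by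
      rw [PySem.List.pyGetD_eq_getElem sh (0, 0) (by omega) (by omega)]
      simp only [show ((j : Int) - 1).toNat = j - 1 by omega]
    have hj1 : ((j : Int) + 1) = ((j + 1 : Nat) : Int) := by omega
    rw [hj1, List.drop_eq_getElem_cons hlt]
    have hj1' : j + 1 - 1 = j := by omega
    simp only [hcur, hprev, grp]
    by_cases hc : (sh[j]'hlt).1 = (sh[j-1]'(by omega)).1
    · rw [if_pos hc, if_pos hc]
      have := ih (j + 1) (by omega) (gs.dropLast ++ [gs.getLastD [] ++ [(sh[j]'hlt).2]]) (by omega) (by omega)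
      simpa [hj1'] using this
    · rw [if_neg hc, if_neg hc]
      have := ih (j + 1) (by omega) (gs ++ [[(sh[j]'hlt).2]]) (by omega) (by omega)
      simpa [hj1'] using this

lemma main_eq (arr : List String) (n : Int) (hpre : 1 ≤ n ∧ n ≤ arr.length) :
    group_identical_strings arr n = group_identical_strings_alt arr n := by
  obtain ⟨hn1, hn2⟩ := hpre
  unfold group_identical_strings group_identical_strings_alt
  dsimp only
  set f : Int → Int := fun i => compute_hash (PySem.List.pyGetD arr i "") with hf
  set R : List Int := PySem.List.pyRange 0 n 1 with hR
  have hpairs : R.foldl (fun acc i => acc ++ [(f i, i)]) []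
      = R.map (fun i => ((f i, i) : Int × Int)) := by
    simpa using PySem.List.foldl_append_singleton_eq_map (fun i => ((f i, i) : Int × Int)) R []
  set pairs : List (Int × Int) := R.map (fun i => (f i, i)) with hpairsdef
  set hashes : List Int := R.map f with hhashes
  set ks : List Int := PySem.List.sorted (PySem.Set.ofList hashes) (fun x => x) false with hks
  set blk : Int → List (Int × Int) := fun h => pairs.filter (fun p => p.1 == h) with hblk
  -- facts
  have hRlen : R.length = n.toNat := by simp [hR, PySem.List.length_pyRange_one]
  have hkspw : ks.Pairwise (· < ·) := PySem.List.sorted_ofList_pairwise_lt hashes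
  have hksnd : ks.Nodup := hkspw.imp (fun h => ne_of_lt h)
  have hmemks : ∀ h, h ∈ ks ↔ h ∈ hashes := by
    intro h
    rw [hks, PySem.List.mem_sorted, PySem.Set.mem_ofList]
  have hcov : ∀ p ∈ pairs, p.1 ∈ ks := by
    intro p hp
    obtain ⟨i, hi, rfl⟩ := List.mem_map.mp hp
    exact (hmemks _).mpr (List.mem_map.mpr ⟨i, hi, rfl⟩)
  have hall : ∀ h ∈ ks, ∀ p ∈ blk h, p.1 = h := by
    intro h _ p hp
    have := List.of_mem_filter hp
    simpa using this
  have hblkne : ∀ h ∈ ks, blk h ≠ [] := by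
    intro h hh
    obtain ⟨i, hi, hfi⟩ := List.mem_map.mp ((hmemks h).mp hh)
    have : (f i, i) ∈ blk h := by
      rw [hblk]
      exact List.mem_filter.mpr ⟨List.mem_map.mpr ⟨i, hi, rfl⟩, by simp [hfi]⟩
    exact fun he => by simp [he] at this
  have hpairspw : pairs.Pairwise (fun p q => p.2 < q.2) := by
    rw [hpairsdef, List.pairwise_map]
    exact PySem.List.pairwise_lt_pyRange_one 0 n
  have hblkpw : ∀ h ∈ ks, (blk h).Pairwise lexlt := by
    intro h hh
    have hpw : (blk h).Pairwise (fun p q => p.2 < q.2) := hpairspw.filter _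
    refine hpw.imp_of_mem ?_
    intro p q hp hq hlt
    exact Or.inr ⟨by rw [hall h hh p hp, hall h hh q hq], hlt⟩
  -- sorted pairs = flatMap of blocks
  have hsh : PySem.List.sorted2 pairs Prod.fst Prod.snd = ks.flatMap blk := by
    apply sorted2_eq_of_perm_of_pairwise_lexlt
    · exact perm_flatMap_filter ks pairs hksnd hcov
    · exact pairwise_flatMap_lexlt blk ks hkspw hall hblkpw
  rw [hpairs, hsh]
  -- ks nonempty, first block nonempty
  have hhne : hashes ≠ [] := by
    have : R ≠ [] := by
      intro he
      rw [he] at hRlen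
      simp at hRlen
      omega
    simpa [hhashes] using this
  obtain ⟨k0, kt, hksc⟩ : ∃ k0 kt, ks = k0 :: kt := by
    cases h : ks with
    | nil =>
      exfalso
      rw [hks, PySem.List.sorted_eq_nil_iff] at h
      cases hhs : hashes with
      | nil => exact hhne hhs
      | cons a t =>
        have hm : a ∈ PySem.Set.ofList hashes :=
          (PySem.Set.mem_ofList hashes a).mpr (by rw [hhs]; simp)
        rw [h] at hm
        simp at hm
    | cons a t => exact ⟨a, t, rfl⟩
  obtain ⟨p0, b0, hb0⟩ : ∃ p0 b0, blk k0 = p0 :: b0 := by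
    cases h : blk k0 with
    | nil => exact absurd h (hblkne k0 (by simp [hksc]))
    | cons a t => exact ⟨a, t, rfl⟩
  have hp01 : p0.1 = k0 := hall k0 (by simp [hksc]) p0 (by simp [hb0])
  have hflatc : ks.flatMap blk = p0 :: (b0 ++ kt.flatMap blk) := by
    rw [hksc, List.flatMap_cons, hb0]; simp
  rw [hflatc, PySem.List.pyGetD_zero_cons]
  -- length bookkeeping: the fold range
  have hlen : ((p0 :: (b0 ++ kt.flatMap blk)).length : Int) = n := by
    have h1 : (ks.flatMap blk).length = pairs.length :=
      (perm_flatMap_filter ks pairs hksnd hcov).length_eq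
    rw [← hflatc, h1]
    simp [hpairsdef, hRlen]
    omega
  rw [show (PySem.List.pyRange 1 n 1) = PySem.List.pyRange ((1 : Nat) : Int) ((p0 :: (b0 ++ kt.flatMap blk)).length : Int) 1 by rw [hlen]; norm_num]
  rw [fold_idx (p0 :: (b0 ++ kt.flatMap blk)) 1 [[p0.2]] (by omega) (by simp)]
  simp only [Nat.sub_self, List.drop_succ_cons, List.drop_zero, List.getElem_cons_zero]
  rw [show ([[p0.2]] : List (List Int)) = [] ++ [[p0.2]] from rfl]
  rw [grp_block b0 [] [p0.2] p0.1 (kt.flatMap blk)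
    (fun p hp => by rw [hall k0 (by simp [hksc]) p (by simp [hb0, hp]), hp01])]
  rw [grp_flat blk kt [] ([p0.2] ++ b0.map (·.2)) p0.1
    (by rw [hp01]; rw [hksc] at hkspw; exact hkspw)
    (fun h hh => ⟨hblkne h (by simp [hksc, hh]), hall h (by simp [hksc, hh])⟩)]
  -- now the B side: the dict fold's keys and lookups
  set table : PySem.Dict Int (List Int) :=
    R.foldl (fun d i => d.modify (f i) [] (· ++ [i])) PySem.Dict.empty with htable
  have htkeys : table.keys = PySem.Set.ofList hashes := by
    rw [htable, PySem.Dict.keys_foldl_modify_key R f [] (fun _ i xs => xs ++ [i]) PySem.Dict.empty]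
    rw [PySem.Dict.keys_empty, PySem.Set.update_nil_left, hhashes]
  have htgetD : ∀ h, table.getD h [] = (blk h).map (·.2) := by
    intro h
    have hfold : table = pairs.foldl (fun d p => d.modify p.1 [] (· ++ [p.2])) PySem.Dict.empty := by
      rw [htable, hpairsdef, List.foldl_map]
    rw [hfold, PySem.Dict.getD_foldl_modify_append]
    simp [hblk]
  rw [htkeys, ← hks]
  rw [List.map_congr_left (fun h _ => htgetD h)]
  rw [hksc, List.map_cons, hb0]
  simp

-- ===== VERDICT (by name: the statement is the Claim_ definition above) =====
theorem group_identical_strings_spec : Claim_equal_group_identical_strings := by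
  intro arr n _ hpre
  unfold Spec_group_identical_strings
  exact main_eq arr n hpre

@[simp] theorem group_identical_strings_raises : Claim_raises_group_identical_strings := by
  unfold Claim_raises_group_identical_strings
  refine ⟨?_, by decide⟩
  intro arr n _ hr hp
  unfold Pre_group_identical_strings at hp
  unfold Raises_group_identical_strings at hr
  omega
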